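-- pv_equiv track=rewrite | github.com/ZhangxinheSzU/SpeechVisnet | src/evaluation/parse_sql_one.py | _table_column_map
-- ===== SOURCE A (Python) =====
-- def _table_column_map(table):
--     idMap = {}
--     i = 1
--     for table_index, key in enumerate(table.keys()):
--         idMap[table_index] = []
--         for val in table[key]:
--             idMap[table_index].append(i)
--             i = i + 1
--
--     return idMap
-- ===== SOURCE B (Python) =====
-- def _table_column_map(table):
--     counts = [len(table[key]) for key in table.keys()]
--     starts = [1]
--     for c in counts:
--         starts.append(starts[-1] + c)
--     return {idx: list(range(starts[idx], starts[idx + 1]))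
--             for idx in range(len(counts))}
-- ===== Notes on version B (the rewrite author's own statement) =====
-- stated objective: alternative
-- what changed: Replaces the running counter threaded through nested append loops by a precomputed prefix-sum table of start offsets, building each id list as one range(starts[idx], starts[idx+1]) in a dict comprehension.
import Mathlib
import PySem

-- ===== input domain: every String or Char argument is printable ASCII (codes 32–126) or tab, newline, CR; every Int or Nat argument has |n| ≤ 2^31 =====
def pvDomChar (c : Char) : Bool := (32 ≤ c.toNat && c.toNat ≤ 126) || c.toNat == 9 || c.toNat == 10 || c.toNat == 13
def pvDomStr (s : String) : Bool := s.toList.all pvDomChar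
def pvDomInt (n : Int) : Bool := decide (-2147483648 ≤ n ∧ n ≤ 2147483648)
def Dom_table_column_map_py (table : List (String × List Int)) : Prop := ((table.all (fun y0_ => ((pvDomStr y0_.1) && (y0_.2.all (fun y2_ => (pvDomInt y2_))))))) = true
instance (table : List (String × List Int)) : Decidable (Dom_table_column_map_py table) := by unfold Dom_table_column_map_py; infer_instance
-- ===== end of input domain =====

-- B replaces A's running counter threaded through nested append loops by a prefix-sum
-- table of start offsets and per-table ranges (objective: alternative decomposition).

-- ===== PORT A =====
-- literal transliteration: idMap is a dict, i the running counter; idMap[ti].append(i)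
-- is ported as insert ti (getD ti [] ++ [i]); table[key] as d.getD key [] (key ∈ keys,
-- so the lookup never raises and getD is exact).
def table_column_map_py (table : List (String × List Int)) : List (Int × List Int) :=
  let d := PySem.Dict.mk table
  let res := (PySem.List.enumerate d.keys 0).foldl
    (fun (st : PySem.Dict Int (List Int) × Int) p =>
      let st1 : PySem.Dict Int (List Int) × Int := (st.1.insert p.1 [], st.2)
      (d.getD p.2 []).foldl
        (fun s _v => (s.1.insert p.1 (s.1.getD p.1 [] ++ [s.2]), s.2 + 1)) st1)
    (PySem.Dict.empty, 1)
  res.1.items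

-- ===== PORT B =====
def table_column_map_py_alt (table : List (String × List Int)) : List (Int × List Int) :=
  let d := PySem.Dict.mk table
  let counts : List Int := d.keys.map (fun k => PySem.List.len (d.getD k []))
  let starts : List Int := counts.foldl (fun s c => s ++ [PySem.List.pyGetD s (-1) 0 + c]) [1]
  (List.range counts.length).map
    (fun (idx : Nat) => ((idx : Int),
      PySem.List.pyRange (PySem.List.pyGetD starts (idx : Int) 0)
        (PySem.List.pyGetD starts ((idx : Int) + 1) 0) 1))

-- ===== PRECONDITION & SPEC =====
def Spec_table_column_map_py (table : List (String × List Int)) (out : List (Int × List Int)) : Prop := out = table_column_map_py_alt table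
instance (table : List (String × List Int)) (out : List (Int × List Int)) : Decidable (Spec_table_column_map_py table out) := by unfold Spec_table_column_map_py; infer_instance

-- ===== CLAIM (what is proved, stated in full; the proofs are below) =====
def Claim_equal_table_column_map_py : Prop := ∀ (table : List (String × List Int)), Dom_table_column_map_py table → Spec_table_column_map_py table (table_column_map_py table)

-- ===== LEMMAS AND PROOFS =====

-- common description of the result: one entry per key, consecutive ids
def pvExpected (d : PySem.Dict String (List Int)) : List String → Nat → Int → List (Int × List Int)
  | [], _, _ => []
  | k :: ks, s, i =>
    ((s : Int), PySem.List.pyRange i (i + ((d.getD k []).length : Int)) 1)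
      :: pvExpected d ks (s + 1) (i + ((d.getD k []).length : Int))

theorem pv_inner (ti : Int) (vals : List Int) :
    ∀ (m : PySem.Dict Int (List Int)) (acc : List Int) (i : Int),
    vals.foldl (fun s _v => (s.1.insert ti (s.1.getD ti [] ++ [s.2]), s.2 + 1)) (m.insert ti acc, i)
      = (m.insert ti (acc ++ PySem.List.pyRange i (i + (vals.length : Int)) 1), i + (vals.length : Int)) := by
  induction vals with
  | nil => intro m acc i; simp [PySem.List.pyRange_one_eq_nil]
  | cons v vs ih =>
    intro m acc i
    simp only [List.foldl_cons, PySem.Dict.getD_insert_self, PySem.Dict.insert_insert_self]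
    rw [ih m (acc ++ [i]) (i + 1)]
    have h1 : i < i + ((v :: vs).length : Int) := by
      simp only [List.length_cons]; push_cast; omega
    have h2 : i + 1 + (vs.length : Int) = i + ((v :: vs).length : Int) := by
      simp only [List.length_cons]; push_cast; ring
    rw [PySem.List.pyRange_one_cons h1, h2]
    simp

theorem pv_outer (d : PySem.Dict String (List Int)) (ks : List String) :
    ∀ (s : Nat) (m : PySem.Dict Int (List Int)) (i : Int),
    (∀ j : Int, m.contains j = true → j < (s : Int)) →
    (((PySem.List.enumerate ks (s : Int)).foldl
      (fun (st : PySem.Dict Int (List Int) × Int) p =>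
        (d.getD p.2 []).foldl
          (fun q _v => (q.1.insert p.1 (q.1.getD p.1 [] ++ [q.2]), q.2 + 1))
          (st.1.insert p.1 [], st.2))
      (m, i)).1).items = m.items ++ pvExpected d ks s i := by
  induction ks with
  | nil => intro s m i _; simp [PySem.List.enumerate_nil, pvExpected]
  | cons k ks ih =>
    intro s m i hm
    rw [PySem.List.enumerate_cons]
    simp only [List.foldl_cons]
    have h1 := pv_inner (s : Int) (d.getD k []) m [] i
    simp only [List.nil_append] at h1
    rw [h1]
    have hfresh : m.contains (s : Int) = false := by
      by_contra h
      have h' : m.contains (s : Int) = true := by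
        revert h; cases m.contains (s : Int) <;> simp
      have := hm (s : Int) h'
      omega
    have hm' : ∀ j : Int, (m.insert (s : Int) (PySem.List.pyRange i (i + ((d.getD k []).length : Int)) 1)).contains j = true → j < ((s + 1 : Nat) : Int) := by
      intro j hj
      rw [PySem.Dict.contains_insert] at hj
      by_cases hje : j = (s : Int)
      · subst hje; push_cast; omega
      · have hc : m.contains j = true := by
          have : (j == (s : Int)) = false := by simp [hje]
          simpa [this] using hj
        have := hm j hc; push_cast; omega
    have hrec := ih (s + 1) (m.insert (s : Int) (PySem.List.pyRange i (i + ((d.getD k []).length : Int)) 1)) (i + ((d.getD k []).length : Int)) hm'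
    push_cast at hrec ⊢
    rw [hrec, PySem.Dict.items_insert_of_not_contains _ _ hfresh]
    simp [pvExpected]

-- starts-list characterisation: the foldl-append loop is a prefix-sum scan
def pvPfx : Int → List Int → List Int
  | _, [] => []
  | i, c :: cs => (i + c) :: pvPfx (i + c) cs

theorem pv_starts (cs : List Int) :
    ∀ (pre : List Int) (last : Int),
    cs.foldl (fun s c => s ++ [PySem.List.pyGetD s (-1) 0 + c]) (pre ++ [last])
      = (pre ++ [last]) ++ pvPfx last cs := by
  induction cs with
  | nil => intro pre last; simp [pvPfx]
  | cons c cs ih =>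
    intro pre last
    simp only [List.foldl_cons, PySem.List.pyGetD_neg_one_append_singleton]
    rw [List.append_assoc pre [last] [last + c]]
    have := ih (pre ++ [last]) (last + c)
    simp only [List.append_assoc] at this ⊢
    rw [this, pvPfx]
    simp

theorem pv_B_expected (d : PySem.Dict String (List Int)) (ks : List String) :
    ∀ (s : Nat) (i : Int),
    (List.range ks.length).map
      (fun (idx : Nat) => (((s : Int) + (idx : Int)),
        PySem.List.pyRange ((i :: pvPfx i (ks.map (fun k => ((d.getD k []).length : Int)))).getD idx 0)
          ((i :: pvPfx i (ks.map (fun k => ((d.getD k []).length : Int)))).getD (idx + 1) 0) 1))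
      = pvExpected d ks s i := by
  induction ks with
  | nil => intro s i; simp [pvExpected]
  | cons k ks ih =>
    intro s i
    rw [List.length_cons, List.range_succ_eq_map, List.map_cons, List.map_map, pvExpected]
    simp only [List.cons.injEq]
    refine ⟨by simp [pvPfx], ?_⟩
    rw [← ih (s + 1) (i + ((d.getD k []).length : Int))]
    apply List.map_congr_left
    intro idx _
    simp only [Function.comp_apply, List.map_cons, pvPfx, Prod.mk.injEq]
    refine ⟨by push_cast; ring, ?_⟩
    simp

-- ===== VERDICT (by name: the statement is the Claim_ definition above) =====
theorem table_column_map_py_spec : Claim_equal_table_column_map_py := by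
  intro table _
  show table_column_map_py table = table_column_map_py_alt table
  unfold table_column_map_py table_column_map_py_alt
  dsimp only
  set d := PySem.Dict.mk table with hd
  have hA := pv_outer d d.keys 0 PySem.Dict.empty 1 (by intro j h; simp [PySem.Dict.contains_empty] at h)
  simp only [Nat.cast_zero] at hA
  rw [hA]
  have hS := pv_starts (d.keys.map (fun k => PySem.List.len (d.getD k []))) [] 1
  simp only [List.nil_append] at hS
  rw [hS]
  have hB := pv_B_expected d d.keys 0 1
  simp only [Nat.cast_zero, zero_add] at hB
  have he : (PySem.Dict.empty : PySem.Dict Int (List Int)).items = [] := rfl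
  rw [he, List.nil_append, ← hB]
  simp only [List.length_map]
  apply List.map_congr_left
  intro idx hidx
  rw [List.mem_range] at hidx
  have hlen : ∀ k, PySem.List.len (d.getD k []) = ((d.getD k []).length : Int) := by
    intro k; simp [PySem.List.len_eq]
  have hmap : List.map (fun k => PySem.List.len (d.getD k [])) d.keys
      = List.map (fun k => ((d.getD k []).length : Int)) d.keys :=
    List.map_congr_left (fun k _ => hlen k)
  simp only [Prod.mk.injEq]
  refine ⟨trivial, ?_⟩
  rw [hmap, show ((idx : Int) + 1) = ((idx + 1 : Nat) : Int) by push_cast; ring,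
    PySem.List.pyGetD_natCast, PySem.List.pyGetD_natCast]
  simp
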